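-- pv_equiv track=rewrite | github.com/peppermintcoding/ascii-playground | terminal-animation/fish_animation.py | _add_text_block
-- ===== SOURCE A (Python) =====
-- def _add_text_block(
--     canvas: list[str], text_block: str, cols: int, x: int, y: int
-- ) -> list[str]:
--     ix = x
--     for char in text_block:
--         if char == "\n":
--             y += 1
--             ix = x
--             continue
--         canvas[y * (cols + 1) + ix] = char
--         ix += 1
--     return canvas
-- ===== SOURCE B (Python) =====
-- def _add_text_block(
--     canvas: list[str], text_block: str, cols: int, x: int, y: int
-- ) -> list[str]:
--     for i, line in enumerate(text_block.split("\n")):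
--         base = (y + i) * (cols + 1) + x
--         for j, char in enumerate(line):
--             canvas[base + j] = char
--     return canvas
-- ===== Notes on version B (the rewrite author's own statement) =====
-- stated objective: alternative
-- what changed: Replaces the single char-by-char scan with an explicit y/ix cursor and a newline branch by splitting the text into lines first and writing each line with two nested enumerate loops whose row/column indices are computed directly from the loop counters.
import Mathlib
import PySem

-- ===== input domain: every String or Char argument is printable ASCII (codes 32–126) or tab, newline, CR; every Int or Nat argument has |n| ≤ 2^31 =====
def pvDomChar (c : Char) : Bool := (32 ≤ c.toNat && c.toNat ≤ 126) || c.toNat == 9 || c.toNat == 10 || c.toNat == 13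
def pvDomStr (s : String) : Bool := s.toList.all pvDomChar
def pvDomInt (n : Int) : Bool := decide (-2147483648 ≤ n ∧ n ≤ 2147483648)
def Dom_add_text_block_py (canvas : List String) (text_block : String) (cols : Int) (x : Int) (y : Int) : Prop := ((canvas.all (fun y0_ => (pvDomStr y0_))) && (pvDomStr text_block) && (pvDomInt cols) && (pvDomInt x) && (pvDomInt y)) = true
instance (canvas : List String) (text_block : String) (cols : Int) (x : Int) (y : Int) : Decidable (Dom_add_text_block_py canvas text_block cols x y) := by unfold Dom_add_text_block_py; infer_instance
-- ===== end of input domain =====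

-- B rewrites the single char-by-char scan with a newline branch as a split('\n') preprocessing
-- step followed by two nested enumerate loops (row/column); same return value, and like A it
-- mutates `canvas` in place in Python (the claim here is about the return value).


-- ===== PORT A =====
-- A's loop body: state is (canvas, y, ix)
def pvStepA (cols x : Int) (st : List String × Int × Int) (c : Char) : List String × Int × Int :=
  if c = '\n' then (st.1, st.2.1 + 1, x)
  else (PySem.List.pySetD st.1 (st.2.1 * (cols + 1) + st.2.2) c.toString, st.2.1, st.2.2 + 1)

def add_text_block_py (canvas : List String) (text_block : String) (cols : Int) (x : Int) (y : Int) : List String :=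
  (text_block.toList.foldl (pvStepA cols x) (canvas, y, x)).1

-- ===== PORT B =====
-- B's inner loop: `for j, char in enumerate(line): canvas[base + j] = char`
def pvRowWrite (cols x row : Int) (cv : List String) (line : List Char) : List String :=
  line.zipIdx.foldl (fun cv cj => PySem.List.pySetD cv (row * (cols + 1) + x + cj.2) cj.1.toString) cv

def add_text_block_py_alt (canvas : List String) (text_block : String) (cols : Int) (x : Int) (y : Int) : List String :=
  ((PySem.Chars.splitOn text_block.toList ['\n']).zipIdx).foldl
    (fun cv li => pvRowWrite cols x (y + li.2) cv li.1) canvas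

-- ===== PRECONDITION & SPEC =====
-- Pre_ excludes exactly the inputs on which A's `canvas[...] = char` raises IndexError:
-- every written index (row y+i, column x+j for the j-th char of the i-th '\n'-separated line)
-- must be a Python-valid index into canvas (negative in-range indices wrap in BOTH programs and stay inside Pre_).
def Pre_add_text_block_py (canvas : List String) (text_block : String) (cols : Int) (x : Int) (y : Int) : Prop :=
  ∀ li ∈ (PySem.Chars.splitOn text_block.toList ['\n']).zipIdx, ∀ j < li.1.length,
    PySem.Raise.InRange canvas.length ((y + li.2) * (cols + 1) + x + j)
instance (canvas : List String) (text_block : String) (cols : Int) (x : Int) (y : Int) : Decidable (Pre_add_text_block_py canvas text_block cols x y) := by unfold Pre_add_text_block_py; infer_instance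

def pvWitness_add_text_block_py : List String × String × Int × Int × Int := (["a", "b", "c", "d"], "hi", 1, 0, 0)

def Spec_add_text_block_py (canvas : List String) (text_block : String) (cols : Int) (x : Int) (y : Int) (out : List String) : Prop := out = add_text_block_py_alt canvas text_block cols x y
instance (canvas : List String) (text_block : String) (cols : Int) (x : Int) (y : Int) (out : List String) : Decidable (Spec_add_text_block_py canvas text_block cols x y out) := by unfold Spec_add_text_block_py; infer_instance

-- ===== CLAIM (what is proved, stated in full; the proofs are below) =====
def Claim_equal_add_text_block_py : Prop := ∀ (canvas : List String) (text_block : String) (cols : Int) (x : Int) (y : Int), Dom_add_text_block_py canvas text_block cols x y → Pre_add_text_block_py canvas text_block cols x y → Spec_add_text_block_py canvas text_block cols x y (add_text_block_py canvas text_block cols x y)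

-- ===== LEMMAS AND PROOFS =====

-- common recursive semantics: write chars at column offset k of row yy, '\n' moves to next row
def pvWriteAll (cols x : Int) (cv : List String) (yy : Int) (k : Nat) : List Char → List String
  | [] => cv
  | c :: rest =>
      if c = '\n' then pvWriteAll cols x cv (yy + 1) 0 rest
      else pvWriteAll cols x (PySem.List.pySetD cv (yy * (cols + 1) + x + k) c.toString) yy (k + 1) rest

-- structural lines function: split on '\n', never empty
def pvLines : List Char → List (List Char)
  | [] => [[]]
  | c :: rest =>
      if c = '\n' then [] :: pvLines rest
      else match pvLines rest with
           | [] => [[c]]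
           | h :: t => (c :: h) :: t

theorem pvLines_ne_nil (l : List Char) : pvLines l ≠ [] := by
  cases l with
  | nil => simp [pvLines]
  | cons c rest =>
      simp only [pvLines]
      split
      · simp
      · cases h : pvLines rest <;> simp

theorem pvSplitOn_go_eq (sep : List Char) (hsep : sep = ['\n']) :
    ∀ (l : List Char) (fuel : Nat) (cur : List Char) (acc : List (List Char)), l.length < fuel →
      PySem.Chars.splitOn.go sep fuel l cur acc
        = acc.reverse ++ (match pvLines l with
                          | [] => []
                          | h :: t => (cur.reverse ++ h) :: t) := by
  subst hsep
  intro l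
  induction l with
  | nil =>
      intro fuel cur acc h
      cases fuel with
      | zero => omega
      | succ n => simp [PySem.Chars.splitOn.go, pvLines]
  | cons c rest ih =>
      intro fuel cur acc h
      cases fuel with
      | zero => omega
      | succ n =>
          by_cases hc : c = '\n'
          · subst hc
            have hpre : List.isPrefixOf ['\n'] ('\n' :: rest) = true := by
              simp [List.isPrefixOf]
            simp only [PySem.Chars.splitOn.go, hpre, if_pos]
            rw [show List.drop (['\n'].length) ('\n' :: rest) = rest from rfl]
            rw [ih n [] (cur.reverse :: acc) (by simpa using Nat.lt_of_succ_lt_succ h)]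
            simp [pvLines]
            cases hr : pvLines rest with
            | nil => exact absurd hr (pvLines_ne_nil rest)
            | cons h0 t0 => simp
          · have hpre : List.isPrefixOf ['\n'] (c :: rest) = false := by
              simp [List.isPrefixOf]
              exact fun hcc => hc hcc.symm
            simp only [PySem.Chars.splitOn.go, hpre, Bool.false_eq_true, if_false]
            rw [ih n (c :: cur) acc (by simpa using Nat.lt_of_succ_lt_succ h)]
            cases hr : pvLines rest with
            | nil => exact absurd hr (pvLines_ne_nil rest)
            | cons h0 t0 => simp [pvLines, hc, hr]
  
theorem pvSplitOn_eq_pvLines (l : List Char) :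
    PySem.Chars.splitOn l ['\n'] = pvLines l := by
  show PySem.Chars.splitOn.go ['\n'] (l.length + 1) l [] [] = _
  rw [pvSplitOn_go_eq ['\n'] rfl l (l.length + 1) [] [] (by omega)]
  cases hr : pvLines l with
  | nil => exact absurd hr (pvLines_ne_nil l)
  | cons h t => simp

-- A's fold computes pvWriteAll
theorem pvFoldA_eq (cols x : Int) :
    ∀ (l : List Char) (cv : List String) (yy : Int) (k : Nat),
      (l.foldl (pvStepA cols x) (cv, yy, x + (k : Int))).1 = pvWriteAll cols x cv yy k l := by
  intro l
  induction l with
  | nil => intro cv yy k; simp [pvWriteAll]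
  | cons c rest ih =>
      intro cv yy k
      by_cases hc : c = '\n'
      · subst hc
        simp only [List.foldl_cons, pvStepA, pvWriteAll]
        have := ih cv (yy + 1) 0
        simpa using this
      · simp only [List.foldl_cons, pvStepA, if_neg hc, pvWriteAll]
        have harith : yy * (cols + 1) + (x + (k : Int)) = yy * (cols + 1) + x + (k : Int) := by ring
        have hk : x + (k : Int) + 1 = x + ((k + 1 : Nat) : Int) := by push_cast; ring
        rw [harith, hk]
        exact ih _ yy (k + 1)

theorem pvFoldB_eq (cols x y : Int) :
    ∀ (l : List Char) (i k : Nat) (cv : List String) (h : List Char) (t : List (List Char)), pvLines l = h :: t →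
      (t.zipIdx (i + 1)).foldl (fun cv li => pvRowWrite cols x (y + li.2) cv li.1)
        ((h.zipIdx k).foldl (fun cv cj => PySem.List.pySetD cv ((y + (i : Int)) * (cols + 1) + x + cj.2) cj.1.toString) cv)
        = pvWriteAll cols x cv (y + (i : Int)) k l := by
  intro l
  induction l with
  | nil =>
      intro i k cv h t hl
      simp only [pvLines] at hl
      cases hl
      simp [pvWriteAll]
  | cons c rest ih =>
      intro i k cv h t hl
      by_cases hc : c = '\n'
      · subst hc
        simp only [pvLines] at hl
        cases hl
        cases hr : pvLines rest with
        | nil => exact absurd hr (pvLines_ne_nil rest)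
        | cons h0 t0 =>
            simp only [List.zipIdx_nil, List.foldl_nil, List.zipIdx_cons, List.foldl_cons]
            have := ih (i + 1) 0 cv h0 t0 hr
            simp only [pvWriteAll]
            have hcast : y + ((i + 1 : Nat) : Int) = y + (i : Int) + 1 := by push_cast; ring
            rw [show ((i:Nat)+1+1) = (i+1)+1 from rfl] at *
            calc (t0.zipIdx (i + 1 + 1)).foldl (fun cv li => pvRowWrite cols x (y + li.2) cv li.1)
                    (pvRowWrite cols x (y + ((i + 1 : Nat) : Int)) cv h0)
                  = (t0.zipIdx (i + 1 + 1)).foldl (fun cv li => pvRowWrite cols x (y + li.2) cv li.1)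
                    ((h0.zipIdx 0).foldl (fun cv cj => PySem.List.pySetD cv ((y + ((i + 1 : Nat) : Int)) * (cols + 1) + x + cj.2) cj.1.toString) cv) := by
                      simp [pvRowWrite]
              _ = pvWriteAll cols x cv (y + ((i + 1 : Nat) : Int)) 0 rest := this
              _ = pvWriteAll cols x cv (y + (i : Int) + 1) 0 rest := by rw [hcast]
      · simp only [pvLines, if_neg hc] at hl
        cases hr : pvLines rest with
        | nil => exact absurd hr (pvLines_ne_nil rest)
        | cons h0 t0 =>
            rw [hr] at hl
            cases hl
            simp only [List.zipIdx_cons, List.foldl_cons, pvWriteAll, if_neg hc]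
            exact ih i (k + 1) _ _ _ hr
  
-- ===== VERDICT (by name: the statement is the Claim_ definition above) =====
theorem add_text_block_py_spec : Claim_equal_add_text_block_py := by
  intro canvas text_block cols x y _ _
  unfold Spec_add_text_block_py add_text_block_py add_text_block_py_alt
  rw [pvSplitOn_eq_pvLines]
  cases hl : pvLines text_block.toList with
  | nil => exact absurd hl (pvLines_ne_nil _)
  | cons h t =>
      have hB := pvFoldB_eq cols x y text_block.toList 0 0 canvas h t hl
      have hA := pvFoldA_eq cols x text_block.toList canvas y 0
      simp only [Nat.cast_zero, add_zero] at hB hA ⊢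
      rw [List.zipIdx_cons, List.foldl_cons]
      rw [hA]
      rw [← hB]
      simp [pvRowWrite]
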